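-- pv_equiv track=rewrite | github.com/Largopie/codingtest-study | 프로그래머스/unrated/181904. 세로 읽기/세로 읽기.py | solution
-- ===== SOURCE A (Python) =====
-- def solution(my_string, m, c):
--     answer = ''
--     string = ''
--
--     for i in range(len(my_string)):
--         string+=my_string[i]
--         if (i+1) % m == 0:
--             answer+=string[c-1]
--             string = ''
--     return answer
-- ===== SOURCE B (Python) =====
-- def solution(my_string, m, c):
--     rows = len(my_string) // m
--     return ''.join(my_string[r * m:(r + 1) * m][c - 1] for r in range(rows))
-- ===== Notes on version B (the rewrite author's own statement) =====
-- stated objective: simpler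
-- what changed: Instead of accumulating each row character by character and indexing the accumulated row at column c-1, B computes the number of complete rows by integer division and joins the c-th character of each directly-sliced row my_string[r*m:(r+1)*m].
-- intended difference: For negative m on a string with at least |m| characters (and c in the row's index range), A accidentally reads columns as if m were |m| because (i+1)%m==0 tests divisibility regardless of sign, while B returns '' since a negative row width yields no rows; an empty result is the intended value for a nonsensical negative width. — e.g. on solution("abcd", -2, 1): A returns "ac", B returns ""
-- outside the precondition, e.g. on solution('', 0, 1): A returns '', B raises ZeroDivisionError
import Mathlib
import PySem

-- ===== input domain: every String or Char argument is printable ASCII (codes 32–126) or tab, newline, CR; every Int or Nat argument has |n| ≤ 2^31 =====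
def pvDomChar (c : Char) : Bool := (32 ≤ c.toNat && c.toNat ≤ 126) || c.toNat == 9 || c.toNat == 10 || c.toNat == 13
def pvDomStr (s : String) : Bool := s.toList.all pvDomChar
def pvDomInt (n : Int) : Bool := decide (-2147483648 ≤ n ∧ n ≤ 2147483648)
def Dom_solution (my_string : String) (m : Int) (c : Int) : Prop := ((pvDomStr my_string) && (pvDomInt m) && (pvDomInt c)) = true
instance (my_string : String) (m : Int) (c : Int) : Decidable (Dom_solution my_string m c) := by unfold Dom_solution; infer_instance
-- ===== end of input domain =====

-- B replaces A's accumulate-a-row-then-index loop by direct row slicing: rows = len//m,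
-- answer joins my_string[r*m:(r+1)*m][c-1] over the complete rows.

-- ===== PORT A =====
-- state: (answer, string), both as List Char; my_string[i] is pyGetD (always in range for i in
-- range(len)); string[c-1] is pyGetD (in range under Pre_, negative c-1 reads from the row's end).
def solution (my_string : String) (m : Int) (c : Int) : String :=
  let s := my_string.toList
  let st := (PySem.List.pyRange 0 (s.length : Int) 1).foldl
    (fun (st : List Char × List Char) i =>
      let string := st.2 ++ [PySem.List.pyGetD s i ' ']
      if PySem.Int.mod (i + 1) m = 0 then
        (st.1 ++ [PySem.List.pyGetD string (c - 1) ' '], ([] : List Char))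
      else (st.1, string))
    (([] : List Char), ([] : List Char))
  String.ofList st.1

-- ===== PORT B =====
def solution_alt (my_string : String) (m : Int) (c : Int) : String :=
  let s := my_string.toList
  let rows := PySem.Int.floordiv (s.length : Int) m
  String.ofList ((PySem.List.pyRange 0 rows 1).map
    (fun r => PySem.List.pyGetD (PySem.List.slice s (some (r * m)) (some ((r + 1) * m))) (c - 1) ' '))

-- ===== PRECONDITION & SPEC =====
-- Pre_ excludes exactly the inputs where A raises: m = 0 on a nonempty string (ZeroDivisionError;
-- for the empty string A returns '' even with m = 0 while B's division raises — excluded and cited),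
-- and c - 1 outside the index range of a width-|m| row when a complete row exists (IndexError).
def Pre_solution (my_string : String) (m : Int) (c : Int) : Prop :=
  m ≠ 0 ∧ (((my_string.toList.length : Int)) < |m| ∨ (1 - |m| ≤ c ∧ c ≤ |m|))
instance (my_string : String) (m : Int) (c : Int) : Decidable (Pre_solution my_string m c) := by
  unfold Pre_solution; infer_instance

def pvWitness_solution : String × Int × Int := ("ihate coding", 2, 2)

-- For negative m on a string with at least |m| characters (and c in the row's index range), A
-- accidentally reads columns as if m were |m| because (i+1)%m==0 tests divisibility regardless of
-- sign, while B returns '' since a negative row width yields no rows; '' is the intended value for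
-- a nonsensical negative width.
def D_solution (my_string : String) (m : Int) (c : Int) : Prop :=
  m ≤ -1 ∧ -m ≤ ((my_string.toList.length : Int)) ∧ 1 + m ≤ c ∧ c ≤ -m
instance (my_string : String) (m : Int) (c : Int) : Decidable (D_solution my_string m c) := by
  unfold D_solution; infer_instance

def Spec_solution (my_string : String) (m : Int) (c : Int) (out : String) : Prop := ¬ D_solution my_string m c → out = solution_alt my_string m c
instance (my_string : String) (m : Int) (c : Int) (out : String) : Decidable (Spec_solution my_string m c out) := by unfold Spec_solution; infer_instance

def pvDiffWitness_solution : String × Int × Int := ("abcd", -2, 1)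
def pvDiffWitnessOut_solution : String × String := ("ac", "")

-- ===== CLAIM (what is proved, stated in full; the proofs are below) =====
def Claim_unchanged_solution : Prop := ∀ (my_string : String) (m : Int) (c : Int), Dom_solution my_string m c → Pre_solution my_string m c → Spec_solution my_string m c (solution my_string m c)
def Claim_changed_solution : Prop := Dom_solution (pvDiffWitness_solution.1) (pvDiffWitness_solution.2.1) (pvDiffWitness_solution.2.2) ∧ Pre_solution (pvDiffWitness_solution.1) (pvDiffWitness_solution.2.1) (pvDiffWitness_solution.2.2) ∧ D_solution (pvDiffWitness_solution.1) (pvDiffWitness_solution.2.1) (pvDiffWitness_solution.2.2) ∧ solution (pvDiffWitness_solution.1) (pvDiffWitness_solution.2.1) (pvDiffWitness_solution.2.2) = pvDiffWitnessOut_solution.1 ∧ solution_alt (pvDiffWitness_solution.1) (pvDiffWitness_solution.2.1) (pvDiffWitness_solution.2.2) = pvDiffWitnessOut_solution.2 ∧ pvDiffWitnessOut_solution.1 ≠ pvDiffWitnessOut_solution.2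
def Claim_exact_solution : Prop := ∀ (my_string : String) (m : Int) (c : Int), Dom_solution my_string m c → Pre_solution my_string m c → D_solution my_string m c → solution my_string m c ≠ solution_alt my_string m c

-- ===== LEMMAS AND PROOFS =====

-- a width-M segment of s, read with getD, is a drop/take slice when it lies inside s
theorem seg_eq_take_drop (l : List Char) (a M : Nat) (h : a + M ≤ l.length) :
    (l.drop a).take M = (List.range M).map (fun j => l.getD (a + j) ' ') := by
  apply List.ext_getElem
  · simp
    omega
  · intro i h1 h2
    simp only [List.getElem_take, List.getElem_drop, List.getElem_map, List.getElem_range]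
    rw [List.getD_eq_getElem l ' ' (by simp at h1 ⊢; omega)]

-- the loop invariant of A's fold: after k characters, answer holds the column entry of each of the
-- k/M complete width-M rows (M = |m|), and string holds the k%M characters of the current row
theorem solution_loop_inv (s : List Char) (m : Int) (c : Int) (M : Nat) (hM : 0 < M)
    (hMm : m.natAbs = M) (k : Nat) :
    (PySem.List.pyRange 0 (k : Int) 1).foldl
      (fun (st : List Char × List Char) i =>
        let string := st.2 ++ [PySem.List.pyGetD s i ' ']
        if PySem.Int.mod (i + 1) m = 0 then
          (st.1 ++ [PySem.List.pyGetD string (c - 1) ' '], ([] : List Char))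
        else (st.1, string))
      (([] : List Char), ([] : List Char))
    = ((List.range (k / M)).map
         (fun r => PySem.List.pyGetD ((List.range M).map (fun j => s.getD (r * M + j) ' ')) (c - 1) ' '),
       (List.range (k % M)).map (fun j => s.getD ((k / M) * M + j) ' ')) := by
  induction k with
  | zero => simp [PySem.List.pyRange_one_eq_nil]
  | succ k ih =>
    have hsr : PySem.List.pyRange 0 ((k : Int) + 1) 1
        = PySem.List.pyRange 0 (k : Int) 1 ++ [(k : Int)] :=
      PySem.List.pyRange_one_succ_right (by positivity)
    have hcond : (PySem.Int.mod ((k : Int) + 1) m = 0) ↔ ((k + 1) % M = 0) := by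
      rw [PySem.Int.mod_eq_zero_iff_dvd, ← Int.natAbs_dvd, hMm,
        show ((k : Int) + 1) = ((k + 1 : Nat) : Int) by push_cast; ring,
        Int.natCast_dvd_natCast, Nat.dvd_iff_mod_eq_zero]
    rw [show ((k + 1 : Nat) : Int) = (k : Int) + 1 by push_cast; ring, hsr, List.foldl_concat, ih]
    simp only [PySem.List.pyGetD_natCast]
    have hdm := Nat.div_add_mod k M
    set q := k / M with hq
    set r := k % M with hr
    have hrM : r < M := Nat.mod_lt _ hM
    have hsplit : M * q + (r + 1) = k + 1 := by rw [← hdm]; ring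
    have hmod : (k + 1) % M = (r + 1) % M := by
      rw [← hsplit, Nat.mul_add_mod]
    have hbuf : (List.range r).map (fun j => s.getD (q * M + j) ' ') ++ [s.getD k ' ']
        = (List.range (r + 1)).map (fun j => s.getD (q * M + j) ' ') := by
      rw [List.range_succ, List.map_append]
      simp only [List.map_cons, List.map_nil]
      rw [Nat.mul_comm q M, ← hdm]
    by_cases hdiv : (k + 1) % M = 0
    · have hrM1 : r + 1 = M := by
        have hd : M ∣ r + 1 := Nat.dvd_of_mod_eq_zero (hmod ▸ hdiv)
        have := Nat.le_of_dvd (Nat.succ_pos r) hd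
        omega
      have hful : k + 1 = M * (q + 1) := by
        rw [← hsplit, hrM1, Nat.mul_succ]
      have hdq : (k + 1) / M = q + 1 := by
        rw [hful, Nat.mul_div_cancel_left _ hM]
      rw [if_pos (hcond.mpr hdiv)]
      simp only [hdiv, hdq, hbuf, hrM1, List.range_zero, List.map_nil]
      rw [List.range_succ, List.map_append]
      simp only [List.map_cons, List.map_nil]
    · have hr1 : r + 1 < M := by
        rcases Nat.lt_or_ge (r + 1) M with h | h
        · exact h
        · exact absurd (by rw [hmod, show r + 1 = M by omega, Nat.mod_self]) hdiv
      have hdq : (k + 1) / M = q ∧ (k + 1) % M = r + 1 := by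
        rw [Nat.div_mod_unique hM]
        exact ⟨by rw [← hdm]; ring, hr1⟩
      rw [if_neg (fun h => hdiv (hcond.mp h)), hdq.1, hdq.2, hbuf]

-- floor division of a nonnegative numerator by a negative denominator is nonpositive
theorem floordiv_nonpos_of_neg (n : Nat) (m : Int) (hm : m < 0) :
    PySem.Int.floordiv (n : Int) m ≤ 0 := by
  have h := PySem.Int.floordiv_mul_add_mod (n : Int) m
  have hb := PySem.Int.mod_neg_bounds (n : Int) hm
  by_contra hq
  rw [not_le] at hq
  have h1 : PySem.Int.floordiv (n : Int) m * m ≤ 1 * m :=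
    mul_le_mul_of_nonpos_right (by omega : (1 : Int) ≤ PySem.Int.floordiv (n : Int) m) hm.le
  have h0 : (0 : Int) ≤ (n : Int) := Int.natCast_nonneg n
  omega

-- ===== VERDICT (by name: the statement is the Claim_ definition above) =====
theorem solution_spec : Claim_unchanged_solution := by
  intro my_string m c _ hpre
  unfold Spec_solution
  intro hnd
  obtain ⟨hm0, hrest⟩ := hpre
  unfold solution solution_alt
  simp only []
  set s := my_string.toList with hs
  rcases lt_or_gt_of_ne hm0 with hm | hm
  · -- m < 0: no complete row inside Pre_ \ D_, both sides are ''
    unfold D_solution at hnd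
    rw [abs_of_neg hm] at hrest
    rw [← hs] at hnd
    have hn : (s.length : Int) < -m := by omega
    have hM : 0 < m.natAbs := by omega
    rw [solution_loop_inv s m c m.natAbs hM rfl s.length]
    have hlt : s.length < m.natAbs := by omega
    rw [Nat.div_eq_of_lt hlt, List.range_zero, List.map_nil,
      PySem.List.pyRange_one_eq_nil (floordiv_nonpos_of_neg s.length m hm), List.map_nil]
  · -- 0 < m: every complete row of A equals B's slice of the same row
    obtain ⟨M, rfl⟩ : ∃ M : Nat, m = (M : Int) := ⟨m.toNat, by omega⟩
    have hM : 0 < M := by exact_mod_cast hm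
    rw [solution_loop_inv s (M : Int) c M hM (Int.natAbs_natCast M) s.length]
    rw [PySem.Int.floordiv_natCast, PySem.List.pyRange_zero_natCast, List.map_map]
    congr 1
    apply List.map_congr_left
    intro r hr
    have hrlt : r < s.length / M := List.mem_range.mp hr
    simp only [Function.comp_apply]
    rw [show ((r : Int)) * (M : Int) = (((r * M : Nat)) : Int) by push_cast; ring,
      show ((r : Int) + 1) * (M : Int) = (((r * M : Nat)) : Int) + ((M : Nat) : Int) by push_cast; ring,
      PySem.List.slice_natCast_add]
    have hin : r * M + M ≤ s.length := by
      have h1 : (r + 1) * M ≤ (s.length / M) * M := Nat.mul_le_mul_right _ (by omega)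
      have h2 := Nat.div_mul_le_self s.length M
      calc r * M + M = (r + 1) * M := by ring
        _ ≤ (s.length / M) * M := h1
        _ ≤ s.length := h2
    rw [seg_eq_take_drop s (r * M) M hin]

theorem solution_changed : Claim_changed_solution := by unfold Claim_changed_solution; decide

theorem solution_tight : Claim_exact_solution := by
  intro my_string m c _ _ hd
  obtain ⟨hm1, hmn, _, _⟩ := hd
  unfold solution solution_alt
  simp only []
  set s := my_string.toList with hs
  have hm : m < 0 := by omega
  have hM : 0 < m.natAbs := by omega
  have hMn : m.natAbs ≤ s.length := by omega
  rw [solution_loop_inv s m c m.natAbs hM rfl s.length,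
    PySem.List.pyRange_one_eq_nil (floordiv_nonpos_of_neg s.length m hm), List.map_nil]
  intro heq
  have := congrArg String.toList heq
  rw [String.toList_ofList, String.toList_ofList] at this
  have hlen := congrArg List.length this
  simp only [List.length_map, List.length_range, List.length_nil] at hlen
  have : 1 ≤ s.length / m.natAbs := (Nat.one_le_div_iff hM).mpr hMn
  omega
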